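-- pv_equiv track=rewrite | github.com/manav8498/Shadow | python/src/shadow/cost_attribution.py | _modal_model
-- ===== SOURCE A (Python) =====
-- def _modal_model(models: list[str]) -> str:
--     """Return the most-common model name, or `mixed` if no clear modal."""
--     if not models:
--         return ""
--     counts: dict[str, int] = {}
--     for m in models:
--         counts[m] = counts.get(m, 0) + 1
--     top_model = max(counts, key=lambda k: counts[k])
--     return top_model if counts[top_model] > len(models) / 2 else "mixed"
-- ===== SOURCE B (Python) =====
-- def _modal_model(models: list[str]) -> str:
--     """Return the most-common model name, or `mixed` if no clear modal."""
--     if not models: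
--         return ""
--     # Boyer-Moore majority vote: one pass to find the only possible majority candidate.
--     candidate, count = "", 0
--     for m in models:
--         if count == 0:
--             candidate, count = m, 1
--         elif m == candidate:
--             count += 1
--         else:
--             count -= 1
--     # Verify: a strict majority (count > len/2) is required, else "mixed".
--     return candidate if 2 * models.count(candidate) > len(models) else "mixed"
-- ===== Notes on version B (the rewrite author's own statement) =====
-- stated objective: alternative
-- what changed: Replaces the dict tally plus max-by-count scan with the Boyer-Moore majority vote (candidate/count single pass) followed by one count of the candidate.
import Mathlib
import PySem

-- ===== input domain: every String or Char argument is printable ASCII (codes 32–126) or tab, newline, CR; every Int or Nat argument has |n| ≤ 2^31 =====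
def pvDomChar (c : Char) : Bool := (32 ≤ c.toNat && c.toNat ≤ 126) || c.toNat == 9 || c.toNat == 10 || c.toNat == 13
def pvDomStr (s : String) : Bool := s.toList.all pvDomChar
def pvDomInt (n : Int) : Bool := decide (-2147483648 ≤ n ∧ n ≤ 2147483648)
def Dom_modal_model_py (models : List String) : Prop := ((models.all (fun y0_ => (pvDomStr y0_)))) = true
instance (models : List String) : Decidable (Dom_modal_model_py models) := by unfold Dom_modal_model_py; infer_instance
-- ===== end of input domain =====

-- B replaces A's dict tally + max-by-count scan with the Boyer-Moore majority vote plus one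
-- verification count (a different algorithm of the same cost; equal return value everywhere).

-- ===== PORT A =====
def modal_model_py (models : List String) : String :=
  if models = [] then ""
  else
    -- counts[m] = counts.get(m, 0) + 1
    let counts : PySem.Dict String Int :=
      models.foldl (fun d m => d.insert m (d.getD m 0 + 1)) PySem.Dict.empty
    -- max(counts, key=lambda k: counts[k]): first key (insertion order) with maximal count;
    -- keys are nonempty here, so the .getD "" default is unreachable
    let top_model := (PySem.List.max? counts.keys (fun k => counts.getD k 0)).getD ""
    -- counts[top_model] > len(models)/2 : exact integer form of the float comparison
    if 2 * counts.getD top_model 0 > (models.length : Int) then top_model else "mixed"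

-- ===== PORT B =====
-- the loop body of Source B's candidate/count pass
def bmStep (s : String × Nat) (m : String) : String × Nat :=
  if s.2 = 0 then (m, 1) else if m = s.1 then (s.1, s.2 + 1) else (s.1, s.2 - 1)

def modal_model_py_alt (models : List String) : String :=
  if models = [] then ""
  else
    let s := models.foldl bmStep ("", 0)
    if 2 * models.count s.1 > models.length then s.1 else "mixed"

-- ===== PRECONDITION & SPEC =====
def Spec_modal_model_py (models : List String) (out : String) : Prop := out = modal_model_py_alt models
instance (models : List String) (out : String) : Decidable (Spec_modal_model_py models out) := by unfold Spec_modal_model_py; infer_instance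

-- ===== CLAIM (what is proved, stated in full; the proofs are below) =====
def Claim_equal_modal_model_py : Prop := ∀ (models : List String), Dom_modal_model_py models → Spec_modal_model_py models (modal_model_py models)

-- ===== LEMMAS AND PROOFS =====

-- Boyer-Moore invariant, relative form: running the vote over l from state (c, k) to the
-- final state r, every element's doubled count is bounded by |l| plus the change in its vote.
theorem count_if_comm (a x : String) :
    (if a = x then (1 : Nat) else 0) = (if x = a then 1 else 0) := by
  by_cases h : x = a
  · simp [h]
  · rw [if_neg h, if_neg (fun hh => h hh.symm)]

theorem bm_rel (l : List String) (c : String) (k : Nat) (x : String) :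
    2 * (l.count x : Int) + (if x = c then (k : Int) else -(k : Int))
      ≤ l.length + (if x = (l.foldl bmStep (c, k)).1 then ((l.foldl bmStep (c, k)).2 : Int)
                    else -((l.foldl bmStep (c, k)).2 : Int)) := by
  induction l generalizing c k with
  | nil => simp
  | cons a t ih =>
    simp only [List.foldl_cons, List.count_cons, List.length_cons, beq_iff_eq, count_if_comm]
    by_cases hk : k = 0
    · subst hk
      rw [show bmStep (c, 0) a = (a, 1) from by simp [bmStep]]
      have H := ih a 1
      split_ifs at H ⊢ <;> push_cast at H ⊢ <;> omega
    · by_cases hac : a = c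
      · subst hac
        rw [show bmStep (a, k) a = (a, k + 1) from by simp [bmStep, hk]]
        have H := ih a (k + 1)
        split_ifs at H ⊢ <;> push_cast at H ⊢ <;> omega
      · rw [show bmStep (c, k) a = (c, k - 1) from by simp [bmStep, hk, hac]]
        have H := ih c (k - 1)
        split_ifs at H ⊢ <;> push_cast at H ⊢ <;> first | omega | simp_all

-- A strict majority element is always the Boyer-Moore candidate.
theorem bm_majority (l : List String) (x : String)
    (h : l.length < 2 * l.count x) : (l.foldl bmStep ("", 0)).1 = x := by
  have h2 := bm_rel l "" 0 x
  by_contra hne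
  simp only [Nat.cast_zero, neg_zero, ite_self, add_zero] at h2
  rw [if_neg (fun he => hne he.symm)] at h2
  omega

theorem modal_model_eq (models : List String) :
    modal_model_py models = modal_model_py_alt models := by
  by_cases h : models = []
  · simp [modal_model_py, modal_model_py_alt, h]
  · simp only [modal_model_py, modal_model_py_alt, if_neg h]
    rw [PySem.Dict.foldl_insert_getD_add_one_eq_counter]
    simp only [PySem.Dict.getD_counter, PySem.Dict.keys_counter]
    have hne : PySem.Set.ofList models ≠ [] := by
      obtain ⟨a, t, rfl⟩ := List.exists_cons_of_ne_nil h
      intro hce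
      have : a ∈ PySem.Set.ofList (a :: t) := (PySem.Set.mem_ofList _ _).2 (by simp)
      simp [hce] at this
    obtain ⟨top, htop⟩ : ∃ top, PySem.List.max? (PySem.Set.ofList models)
        (fun k => (models.count k : Int)) = some top := by
      cases hm : PySem.List.max? (PySem.Set.ofList models) (fun k => (models.count k : Int)) with
      | none => exact absurd ((PySem.List.max?_eq_none_iff _ _).mp hm) hne
      | some v => exact ⟨v, rfl⟩
    rw [htop]
    simp only [Option.getD_some]
    have htopmem : top ∈ models := (PySem.Set.mem_ofList _ _).1 (PySem.List.max?_mem htop)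
    have hmax : ∀ y ∈ models, (models.count y : Int) ≤ (models.count top : Int) := by
      intro y hy
      exact PySem.List.max?_isMax htop y ((PySem.Set.mem_ofList _ _).2 hy)
    by_cases hmaj : models.length < 2 * models.count top
    · -- strict majority: both return top
      have hc := bm_majority models top hmaj
      rw [hc, if_pos (by omega), if_pos (by omega)]
    · -- no majority: both return "mixed"
      have hnomaj : ∀ y ∈ models, ¬ models.length < 2 * models.count y := by
        intro y hy hlt
        have := hmax y hy
        exact hmaj (by omega)
      rw [if_neg (by omega)]
      by_cases hcm : (models.foldl bmStep ("", 0)).1 ∈ models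
      · rw [if_neg (by have := hnomaj _ hcm; omega)]
      · have : models.count (models.foldl bmStep ("", 0)).1 = 0 :=
          List.count_eq_zero.2 hcm
        rw [if_neg (by omega)]

-- ===== VERDICT (by name: the statement is the Claim_ definition above) =====
theorem modal_model_py_spec : Claim_equal_modal_model_py := by
  intro models _
  unfold Spec_modal_model_py
  exact modal_model_eq models
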